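-- pv_equiv track=rewrite | github.com/zhudhjen/ComputerVisionPractice | harris/harris.py | nonmaxSuppress
-- ===== SOURCE A (Python) =====
-- def nonmaxSuppress(response_matrix, threshold, suppress_radius):
--
--     corners = []
--     local_maximum = []
--
--     height = len(response_matrix)
--     width = len(response_matrix[0])
--
--     # calculate local maximum matrix
--     for i in range(height):
--         line = []
--         for j in range(width):
--             # find local maximum
--             range_x = range(max(i - suppress_radius, 0), min(i + suppress_radius + 1, height))
--             range_y = range(max(j - suppress_radius, 0), min(j + suppress_radius + 1, width))
--             max_value = 0
--             for x in range_x: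
--                 for y in range_y:
--                     if response_matrix[x][y] > max_value:
--                         max_value = response_matrix[x][y]
--             line.append(max_value)
--         local_maximum.append(line)
--
--     # extract local maximums to corners list
--     for i in range(height):
--         for j in range(width):
--             # use threshold to filter out blank space and lines
--             if response_matrix[i][j] == local_maximum[i][j] and local_maximum[i][j] > threshold:
--                 corners.append((i, j))
--
--     return corners
-- ===== SOURCE B (Python) =====
-- def nonmaxSuppress(response_matrix, threshold, suppress_radius):
--     # Separable two-pass window maximum: row-window maxima first (slice max),
--     # then merge column windows of those row maxima while collecting corners.
--     height = len(response_matrix)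
--     width = len(response_matrix[0])
--     r = suppress_radius
--
--     # horizontal pass: row_max[x][j] = max of row x over columns [j-r, j+r], None if empty
--     row_max = []
--     for row in response_matrix:
--         rm = []
--         for j in range(width):
--             lo = max(j - r, 0)
--             hi = min(j + r + 1, width)
--             rm.append(max(row[lo:hi], default=None))
--         row_max.append(rm)
--
--     # vertical pass fused with corner extraction
--     corners = []
--     for i in range(height):
--         lo = max(i - r, 0)
--         hi = min(i + r + 1, height)
--         for j in range(width):
--             m = 0
--             for x in range(lo, hi):
--                 v = row_max[x][j]
--                 if v is not None and v > m:
--                     m = v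
--             if response_matrix[i][j] == m and m > threshold:
--                 corners.append((i, j))
--     return corners
-- ===== Notes on version B (the rewrite author's own statement) =====
-- stated objective: faster
-- what changed: Replaces the per-pixel O(r^2) rectangular window scan by a separable two-pass window maximum: a horizontal pass of row-window maxima (C-level slice max) followed by a vertical merge fused with corner extraction.
import Mathlib
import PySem

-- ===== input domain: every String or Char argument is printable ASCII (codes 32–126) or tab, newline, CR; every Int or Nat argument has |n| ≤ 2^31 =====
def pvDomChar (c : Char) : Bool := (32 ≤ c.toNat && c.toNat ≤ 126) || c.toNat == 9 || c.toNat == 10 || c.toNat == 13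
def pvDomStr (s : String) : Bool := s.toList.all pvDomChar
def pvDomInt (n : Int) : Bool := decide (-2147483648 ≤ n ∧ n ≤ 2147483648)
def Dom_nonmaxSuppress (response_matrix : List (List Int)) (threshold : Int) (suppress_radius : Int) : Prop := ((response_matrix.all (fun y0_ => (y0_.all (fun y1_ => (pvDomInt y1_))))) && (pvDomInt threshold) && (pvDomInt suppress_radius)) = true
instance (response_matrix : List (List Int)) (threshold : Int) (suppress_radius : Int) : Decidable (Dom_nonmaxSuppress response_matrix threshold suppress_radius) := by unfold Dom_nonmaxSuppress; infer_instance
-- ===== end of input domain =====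

-- B replaces A's per-pixel O(r^2) rectangular window scan by a separable two-pass
-- window maximum (row-window maxima, then a vertical merge fused with corner
-- extraction); objective: faster.

-- ===== PORT A =====
def nonmaxSuppress (response_matrix : List (List Int)) (threshold : Int) (suppress_radius : Int) : List (Int × Int) :=
  let height : Int := response_matrix.length
  let width : Int := (PySem.List.pyGetD response_matrix 0 []).length
  let local_maximum : List (List Int) :=
    (PySem.List.pyRange 0 height 1).map (fun i =>
      (PySem.List.pyRange 0 width 1).map (fun j =>
        let range_x := PySem.List.pyRange (max (i - suppress_radius) 0) (min (i + suppress_radius + 1) height) 1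
        let range_y := PySem.List.pyRange (max (j - suppress_radius) 0) (min (j + suppress_radius + 1) width) 1
        range_x.foldl (fun max_value x =>
          range_y.foldl (fun max_value y =>
            if PySem.List.pyGetD (PySem.List.pyGetD response_matrix x []) y 0 > max_value
            then PySem.List.pyGetD (PySem.List.pyGetD response_matrix x []) y 0
            else max_value) max_value) 0))
  (PySem.List.pyRange 0 height 1).foldl (fun corners i =>
    (PySem.List.pyRange 0 width 1).foldl (fun corners j =>
      if PySem.List.pyGetD (PySem.List.pyGetD response_matrix i []) j 0 =
           PySem.List.pyGetD (PySem.List.pyGetD local_maximum i []) j 0 ∧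
         PySem.List.pyGetD (PySem.List.pyGetD local_maximum i []) j 0 > threshold
      then corners ++ [(i, j)] else corners) corners) []

-- ===== PORT B =====
def nonmaxSuppress_alt (response_matrix : List (List Int)) (threshold : Int) (suppress_radius : Int) : List (Int × Int) :=
  let height : Int := response_matrix.length
  let width : Int := (PySem.List.pyGetD response_matrix 0 []).length
  let row_max : List (List (Option Int)) :=
    response_matrix.map (fun row =>
      (PySem.List.pyRange 0 width 1).map (fun j =>
        PySem.List.max?
          (PySem.List.slice row (some (max (j - suppress_radius) 0)) (some (min (j + suppress_radius + 1) width)))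
          (fun v => v)))
  (PySem.List.pyRange 0 height 1).foldl (fun corners i =>
    let lo := max (i - suppress_radius) 0
    let hi := min (i + suppress_radius + 1) height
    (PySem.List.pyRange 0 width 1).foldl (fun corners j =>
      let m := (PySem.List.pyRange lo hi 1).foldl (fun m x =>
        match PySem.List.pyGetD (PySem.List.pyGetD row_max x []) j none with
        | none => m
        | some v => if v > m then v else m) 0
      if PySem.List.pyGetD (PySem.List.pyGetD response_matrix i []) j 0 = m ∧ m > threshold
      then corners ++ [(i, j)] else corners) corners) []

-- ===== PRECONDITION & SPEC =====
-- A raises IndexError on an empty matrix (response_matrix[0]) and on matrices with a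
-- row shorter than the first row (response_matrix[x][y]); Pre_ excludes exactly those.
def Pre_nonmaxSuppress (response_matrix : List (List Int)) (threshold : Int) (suppress_radius : Int) : Prop :=
  response_matrix ≠ [] ∧
  ∀ row ∈ response_matrix, (PySem.List.pyGetD response_matrix 0 []).length ≤ row.length
instance (response_matrix : List (List Int)) (threshold : Int) (suppress_radius : Int) : Decidable (Pre_nonmaxSuppress response_matrix threshold suppress_radius) := by unfold Pre_nonmaxSuppress; infer_instance
def pvWitness_nonmaxSuppress : List (List Int) × Int × Int := ([[1, 2], [3, 4]], 0, 1)
def Spec_nonmaxSuppress (response_matrix : List (List Int)) (threshold : Int) (suppress_radius : Int) (out : List (Int × Int)) : Prop := out = nonmaxSuppress_alt response_matrix threshold suppress_radius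
instance (response_matrix : List (List Int)) (threshold : Int) (suppress_radius : Int) (out : List (Int × Int)) : Decidable (Spec_nonmaxSuppress response_matrix threshold suppress_radius out) := by unfold Spec_nonmaxSuppress; infer_instance

-- ===== CLAIM (what is proved, stated in full; the proofs are below) =====
def Claim_equal_nonmaxSuppress : Prop := ∀ (response_matrix : List (List Int)) (threshold : Int) (suppress_radius : Int), Dom_nonmaxSuppress response_matrix threshold suppress_radius → Pre_nonmaxSuppress response_matrix threshold suppress_radius → Spec_nonmaxSuppress response_matrix threshold suppress_radius (nonmaxSuppress response_matrix threshold suppress_radius)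

-- ===== LEMMAS AND PROOFS =====

theorem pvStep_eq_max (a v : Int) : (if v > a then v else a) = max a v := by
  split_ifs with h
  · exact (max_eq_right h.le).symm
  · exact (max_eq_left (not_lt.mp h)).symm

theorem pvFoldlMax_comm (t : List Int) (a b : Int) :
    t.foldl max (max a b) = max a (t.foldl max b) := by
  induction t generalizing b with
  | nil => rfl
  | cons y t ih => simpa [List.foldl_cons, max_assoc] using ih (max b y)

-- running-max loop over a list = merging the list's max (if any) into the accumulator
theorem pvFoldlStep (l : List Int) (a : Int) :
    l.foldl (fun acc v => if v > acc then v else acc) a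
      = match PySem.List.max? l (fun v => v) with
        | none => a
        | some M => if M > a then M else a := by
  cases l with
  | nil => simp [PySem.List.max?]
  | cons x t =>
      rw [PySem.List.max?_id_cons]
      simp only [List.foldl_cons, pvStep_eq_max]
      exact pvFoldlMax_comm t a x

-- a slice with in-range nonnegative bounds is the map of pyGetD over the index range
theorem pvSliceMap (row : List Int) (a b : Int) (h0 : 0 ≤ a) (hab : a ≤ b) (hb : b ≤ (row.length : Int)) :
    (PySem.List.pyRange a b 1).map (fun y => PySem.List.pyGetD row y 0)
      = PySem.List.slice row (some a) (some b) := by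
  have hsplit := PySem.List.pyRange_one_append a b (row.length : Int) hab hb
  have H1 := PySem.List.map_pyGetD_pyRange' (xs := row) (d := 0) (a := a) h0
  have H2 := PySem.List.map_pyGetD_pyRange' (xs := row) (d := 0) (a := b) (h0.trans hab)
  rw [hsplit, List.map_append, H2] at H1
  have hlen : ((PySem.List.pyRange a b 1).map (fun y => PySem.List.pyGetD row y 0)).length
      = b.toNat - a.toNat := by
    rw [List.length_map, PySem.List.length_pyRange_one]; omega
  rw [PySem.List.slice_of_nonneg row h0 (h0.trans hab) (hab.trans hb) hb, ← H1, ← hlen,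
    List.take_left]

-- the rectangular-window running max of A equals B's vertical merge of row-window maxima
theorem pvRect (m : List (List Int)) (r W : Int)
    (hW : ∀ row ∈ m, W ≤ (row.length : Int))
    (i j : Int) (h0j : 0 ≤ j) (hjW : j < W) :
    (PySem.List.pyRange (max (i - r) 0) (min (i + r + 1) (m.length : Int))).foldl
      (fun max_value x =>
        (PySem.List.pyRange (max (j - r) 0) (min (j + r + 1) W)).foldl
          (fun max_value y =>
            if PySem.List.pyGetD (PySem.List.pyGetD m x []) y 0 > max_value
            then PySem.List.pyGetD (PySem.List.pyGetD m x []) y 0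
            else max_value) max_value) 0
      = (PySem.List.pyRange (max (i - r) 0) (min (i + r + 1) (m.length : Int))).foldl
          (fun acc x =>
            match PySem.List.pyGetD
                (PySem.List.pyGetD
                  (m.map (fun row =>
                    (PySem.List.pyRange 0 W).map (fun j =>
                      PySem.List.max?
                        (PySem.List.slice row (some (max (j - r) 0)) (some (min (j + r + 1) W)))
                        (fun v => v))))
                  x []) j none with
            | none => acc
            | some v => if v > acc then v else acc) 0 := by
  apply PySem.List.foldl_congr_mem
  intro acc x hx
  obtain ⟨hx1, hx2⟩ := PySem.List.mem_pyRange_one.mp hx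
  have h0x : 0 ≤ x := le_trans (le_max_right _ _) hx1
  have hxm : x < (m.length : Int) := lt_of_lt_of_le hx2 (min_le_right _ _)
  have hr : 0 ≤ r := by omega
  have hrow : PySem.List.pyGetD m x [] = m[x.toNat]'(by omega) :=
    PySem.List.pyGetD_eq_getElem m [] h0x hxm
  have hmap : PySem.List.pyGetD (m.map (fun row =>
      (PySem.List.pyRange 0 W).map (fun j =>
        PySem.List.max?
          (PySem.List.slice row (some (max (j - r) 0)) (some (min (j + r + 1) W)))
          (fun v => v)))) x [] = _ :=
    PySem.List.pyGetD_eq_getElem (i := x) _ []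
      h0x (by simpa using hxm)
  rw [hmap]
  simp only [List.getElem_map]
  rw [PySem.List.pyGetD_map_pyRange_of_nonneg _ W j none h0j hjW]
  set row := m[x.toNat]'(by omega) with hrowdef
  have hrmem : row ∈ m := List.getElem_mem _
  have hWr : W ≤ (row.length : Int) := hW row hrmem
  have hsm := pvSliceMap row (max (j - r) 0) (min (j + r + 1) W)
    (le_max_right _ _) (by omega) (by omega)
  rw [hrow, ← hsm]
  have hfs := pvFoldlStep
    (List.map (fun y => PySem.List.pyGetD row y 0)
      (PySem.List.pyRange (max (j - r) 0) (min (j + r + 1) W))) acc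
  rw [List.foldl_map] at hfs
  exact hfs

theorem nonmaxSuppress_eq (response_matrix : List (List Int)) (threshold : Int) (suppress_radius : Int)
    (hpre : Pre_nonmaxSuppress response_matrix threshold suppress_radius) :
    nonmaxSuppress response_matrix threshold suppress_radius
      = nonmaxSuppress_alt response_matrix threshold suppress_radius := by
  obtain ⟨hne, hrows⟩ := hpre
  unfold nonmaxSuppress nonmaxSuppress_alt
  dsimp only
  apply PySem.List.foldl_congr_mem
  intro corners i hi
  obtain ⟨h0i, hiH⟩ := PySem.List.mem_pyRange_one.mp hi
  apply PySem.List.foldl_congr_mem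
  intro cs j hj
  obtain ⟨h0j, hjW⟩ := PySem.List.mem_pyRange_one.mp hj
  have e1 := PySem.List.pyGetD_map_pyRange_of_nonneg
    (fun i => (PySem.List.pyRange 0 ((PySem.List.pyGetD response_matrix 0 []).length : Int)).map
      (fun j =>
        (PySem.List.pyRange (max (i - suppress_radius) 0)
            (min (i + suppress_radius + 1) (response_matrix.length : Int))).foldl
          (fun max_value x =>
            (PySem.List.pyRange (max (j - suppress_radius) 0)
                (min (j + suppress_radius + 1)
                  ((PySem.List.pyGetD response_matrix 0 []).length : Int))).foldl
              (fun max_value y =>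
                if PySem.List.pyGetD (PySem.List.pyGetD response_matrix x []) y 0 > max_value
                then PySem.List.pyGetD (PySem.List.pyGetD response_matrix x []) y 0
                else max_value) max_value) 0))
    (response_matrix.length : Int) i [] h0i hiH
  simp only [e1]
  rw [PySem.List.pyGetD_map_pyRange_of_nonneg _ _ j 0 h0j hjW]
  rw [pvRect response_matrix suppress_radius
    ((PySem.List.pyGetD response_matrix 0 []).length : Int)
    (fun row hr => by exact_mod_cast hrows row hr) i j h0j hjW]

-- ===== VERDICT (by name: the statement is the Claim_ definition above) =====
theorem nonmaxSuppress_spec : Claim_equal_nonmaxSuppress := by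
  intro m t r _ hpre
  unfold Spec_nonmaxSuppress
  exact nonmaxSuppress_eq m t r hpre
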